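-- pv_equiv track=rewrite | github.com/injoon2019/ProblemSolving_Python | programmers_naver_bootcamp_4.py | solution
-- ===== SOURCE A (Python) =====
-- def solution(n):
--     arr = [0] * n
--     N = n -1
--     a, c, b = 2, 1, 0
--     for i in range(len(arr)):
--         if i != 0 and i%4 == 0:
--             b = a * (a+1) * (a+2)
--             arr[i] = b
--             a +=1
--             b = 0
--         else:
--             arr[i] = c * (c+1)
--             c +=1
--     return arr[N]
-- ===== SOURCE B (Python) =====
-- def solution(n):
--     # Closed form: the loop's last iteration (index i = n-1) writes the returned cell.
--     i = n - 1
--     if i != 0 and i % 4 == 0: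
--         a = 1 + i // 4
--         return a * (a + 1) * (a + 2)
--     c = (1 + i - (i - 1) // 4) if i > 0 else 1
--     return c * (c + 1)
-- ===== Notes on version B (the rewrite author's own statement) =====
-- stated objective: faster
-- what changed: Replaced the O(n) loop that fills an array of size n with an O(1) closed form: the returned cell is written by the last loop iteration, whose a/c counters are computed arithmetically from n.
import Mathlib
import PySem

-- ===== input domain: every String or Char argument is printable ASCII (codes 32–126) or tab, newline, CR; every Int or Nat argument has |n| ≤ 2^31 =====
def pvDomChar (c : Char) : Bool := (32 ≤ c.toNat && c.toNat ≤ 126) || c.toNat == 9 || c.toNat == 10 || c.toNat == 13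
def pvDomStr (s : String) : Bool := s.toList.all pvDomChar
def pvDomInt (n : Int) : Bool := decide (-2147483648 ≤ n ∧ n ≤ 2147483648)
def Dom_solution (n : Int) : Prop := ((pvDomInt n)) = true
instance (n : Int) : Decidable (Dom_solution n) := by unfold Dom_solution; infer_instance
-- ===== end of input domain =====

-- B replaces A's O(n) array-filling loop with an O(1) closed form for the last written cell.

-- ===== PORT A =====
-- loop body: state (arr, a, c, b); branches in A's order
def solutionStep (st : List Int × Int × Int × Int) (i : Nat) : List Int × Int × Int × Int :=
  let (arr, a, c, b) := st
  if i ≠ 0 ∧ i % 4 = 0 then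
    -- b = a*(a+1)*(a+2); arr[i] = b; a += 1; b = 0
    let b := a * (a + 1) * (a + 2)
    let arr := arr.set i b
    (arr, a + 1, c, 0)
  else
    -- arr[i] = c*(c+1); c += 1
    (arr.set i (c * (c + 1)), a, c + 1, b)

def solution (n : Int) : Int :=
  let arr := List.replicate n.toNat 0   -- [0] * n ([] for n ≤ 0, as in Python)
  let N := n - 1
  let st := (List.range arr.length).foldl solutionStep (arr, 2, 1, 0)
  -- arr[N]; out of range = IndexError, excluded by Pre_solution
  (PySem.List.pyGet? st.1 N).getD 0

-- ===== PORT B =====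
def solution_alt (n : Int) : Int :=
  let i := n - 1
  if i ≠ 0 ∧ PySem.Int.mod i 4 = 0 then
    let a := 1 + PySem.Int.floordiv i 4
    a * (a + 1) * (a + 2)
  else
    let c := if i > 0 then 1 + i - PySem.Int.floordiv (i - 1) 4 else 1
    c * (c + 1)

-- ===== PRECONDITION & SPEC =====
-- A raises IndexError for n ≤ 0 (arr[-1] on an empty list); Pre_ admits exactly n ≥ 1.
def Pre_solution (n : Int) : Prop := 1 ≤ n
instance (n : Int) : Decidable (Pre_solution n) := by unfold Pre_solution; infer_instance
def pvWitness_solution : Int := 5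

def Spec_solution (n : Int) (out : Int) : Prop := out = solution_alt n
instance (n : Int) (out : Int) : Decidable (Spec_solution n out) := by unfold Spec_solution; infer_instance

-- ===== CLAIM (what is proved, stated in full; the proofs are below) =====
def Claim_equal_solution : Prop := ∀ (n : Int), Dom_solution n → Pre_solution n → Spec_solution n (solution n)

-- ===== LEMMAS AND PROOFS =====

-- number of branch iterations among indices 0..k-1
def braCount (k : Nat) : Nat := (k - 1) / 4

-- Invariant of A's loop: after k iterations the counters are determined by braCount,
-- the array keeps length m, and b is 0.
theorem fold_inv (m : Nat) : ∀ k : Nat,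
    ((List.range k).foldl solutionStep (List.replicate m 0, 2, 1, 0)).1.length = m ∧
    ((List.range k).foldl solutionStep (List.replicate m 0, 2, 1, 0)).2.1 = 2 + (braCount k : Int) ∧
    ((List.range k).foldl solutionStep (List.replicate m 0, 2, 1, 0)).2.2.1 = 1 + (k : Int) - (braCount k : Int) ∧
    ((List.range k).foldl solutionStep (List.replicate m 0, 2, 1, 0)).2.2.2 = 0 := by
  intro k
  induction k with
  | zero => simp [braCount]
  | succ k ih =>
    obtain ⟨hl, ha, hc, hb⟩ := ih
    rw [List.range_succ, List.foldl_append]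
    set st := (List.range k).foldl solutionStep (List.replicate m 0, 2, 1, 0) with hst
    obtain ⟨arr, a, c, b⟩ := st
    simp only [List.foldl_cons, List.foldl_nil]
    simp only at hl ha hc hb
    subst ha hc hb
    by_cases hk : k ≠ 0 ∧ k % 4 = 0
    · have hbra : braCount (k + 1) = braCount k + 1 := by
        unfold braCount; omega
      simp [solutionStep, hk, hbra, hl]
      refine ⟨?_, ?_⟩ <;> first | trivial | ring
    · have hbra : braCount (k + 1) = braCount k := by
        unfold braCount; omega
      simp [solutionStep, hk, hbra, hl]
      ring

-- ===== VERDICT (by name: the statement is the Claim_ definition above) =====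
theorem solution_spec : Claim_equal_solution := by
  intro n _ hpre
  unfold Pre_solution at hpre
  unfold Spec_solution solution solution_alt
  obtain ⟨k, hm⟩ : ∃ k, n.toNat = k + 1 := ⟨n.toNat - 1, by omega⟩
  have hnk : n - 1 = (k : Int) := by omega
  obtain ⟨hl, ha, hc, hb⟩ := fold_inv n.toNat k
  simp only [List.length_replicate]
  rw [hm, List.range_succ, List.foldl_append]
  rw [hm] at hl ha hc hb
  set st := (List.range k).foldl solutionStep (List.replicate (k + 1) 0, 2, 1, 0) with hst
  obtain ⟨arr, a, c, b⟩ := st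
  simp only at hl ha hc hb
  subst ha hc hb
  have hmod : PySem.Int.mod (n - 1) 4 = ((k % 4 : Nat) : Int) := by
    rw [hnk]; exact_mod_cast PySem.Int.mod_natCast k 4
  simp only [List.foldl_cons, List.foldl_nil]
  by_cases hk4 : k ≠ 0 ∧ k % 4 = 0
  · have hb : n - 1 ≠ 0 ∧ PySem.Int.mod (n - 1) 4 = 0 := by
      constructor
      · omega
      · rw [hmod]; exact_mod_cast congrArg (Nat.cast (R := Int)) hk4.2
    rw [if_pos hb]
    simp only [solutionStep, if_pos hk4]
    rw [hnk, PySem.List.pyGet?_natCast]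
    have hklt : k < arr.length := by omega
    simp only [List.getElem?_set_self, hklt, Option.getD_some]
    have hdiv : PySem.Int.floordiv ((k : Int)) 4 = ((k / 4 : Nat) : Int) := by
      exact_mod_cast PySem.Int.floordiv_natCast k 4
    rw [hdiv]
    have : (2 + (braCount k : Int)) = 1 + ((k / 4 : Nat) : Int) := by
      unfold braCount; omega
    rw [this]
  · have hb : ¬ (n - 1 ≠ 0 ∧ PySem.Int.mod (n - 1) 4 = 0) := by
      rw [hmod]
      rintro ⟨h0, hz⟩
      exact hk4 ⟨by omega, by omega⟩
    rw [if_neg hb]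
    simp only [solutionStep, if_neg hk4]
    rw [hnk, PySem.List.pyGet?_natCast]
    have hklt : k < arr.length := by omega
    simp only [List.getElem?_set_self, hklt, Option.getD_some]
    by_cases h0 : k = 0
    · subst h0
      norm_num [braCount]
    · have hipos : (0:Int) < n - 1 := by omega
      rw [if_pos (by omega : (k : Int) > 0)]
      have hdiv : PySem.Int.floordiv ((k : Int) - 1) 4 = (((k - 1) / 4 : Nat) : Int) := by
        have hcast : (k : Int) - 1 = ((k - 1 : Nat) : Int) := by omega
        rw [hcast]; exact_mod_cast PySem.Int.floordiv_natCast (k - 1) 4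
      rw [hdiv]
      have hbc : 1 + (k : Int) - (braCount k : Int) = 1 + (k : Int) - (((k - 1) / 4 : Nat) : Int) := by
        unfold braCount; omega
      rw [hbc]
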